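-- pv_equiv track=rewrite | github.com/dbetm/sunset-color-palette-gen | exp/src/color_data_gen/utils.py | gen_columns
-- ===== SOURCE A (Python) =====
-- from typing import List
--
-- def gen_columns(num_colors_per_row: int) -> List[str]:
--     channels_map = ("red", "blue", "green")
--     number_channels = 3
--
--     columns = list()
--
--     for i in range(num_colors_per_row * number_channels):
--         c_name = f"{channels_map[i % number_channels]}{i // 3}"
--         columns.append(c_name)
--
--     return columns
-- ===== SOURCE B (Python) =====
-- from typing import List
--
-- def gen_columns(num_colors_per_row: int) -> List[str]:
--     columns = list()
--     for row in range(num_colors_per_row):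
--         for channel in ("red", "blue", "green"):
--             columns.append(f"{channel}{row}")
--     return columns
-- ===== Notes on version B (the rewrite author's own statement) =====
-- stated objective: simpler
-- what changed: Replaces the single flat loop over range(3*n) with its i%3 tuple-index and i//3 arithmetic by two nested loops (rows, then channels) with no modular or division arithmetic.
import Mathlib
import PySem

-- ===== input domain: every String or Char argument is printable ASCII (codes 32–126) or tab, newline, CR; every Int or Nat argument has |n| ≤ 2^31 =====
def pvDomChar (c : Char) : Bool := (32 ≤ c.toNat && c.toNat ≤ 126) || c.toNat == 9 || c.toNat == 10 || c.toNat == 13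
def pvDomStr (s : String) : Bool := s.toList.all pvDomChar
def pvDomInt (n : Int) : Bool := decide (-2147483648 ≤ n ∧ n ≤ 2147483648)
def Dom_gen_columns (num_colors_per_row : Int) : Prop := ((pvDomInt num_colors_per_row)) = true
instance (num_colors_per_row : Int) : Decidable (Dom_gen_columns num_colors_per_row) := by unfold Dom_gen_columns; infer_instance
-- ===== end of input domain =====

-- B replaces the flat loop over range(3*n) with i%3 / i//3 arithmetic by nested row/channel loops (simpler; same cost).

-- ===== PORT A =====
def gen_columns (num_colors_per_row : Int) : List String :=
  (PySem.List.pyRange 0 (num_colors_per_row * 3) 1).foldl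
    (fun columns i =>
      columns ++ [PySem.List.pyGetD ["red", "blue", "green"] (PySem.Int.mod i 3) ""
                    ++ PySem.Int.toStr (PySem.Int.floordiv i 3)]) []

-- ===== PORT B =====
def gen_columns_alt (num_colors_per_row : Int) : List String :=
  (PySem.List.pyRange 0 num_colors_per_row 1).foldl
    (fun columns row =>
      (["red", "blue", "green"] : List String).foldl
        (fun cols channel => cols ++ [channel ++ PySem.Int.toStr row]) columns) []

-- ===== PRECONDITION & SPEC =====
def Spec_gen_columns (num_colors_per_row : Int) (out : List String) : Prop := out = gen_columns_alt num_colors_per_row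
instance (num_colors_per_row : Int) (out : List String) : Decidable (Spec_gen_columns num_colors_per_row out) := by unfold Spec_gen_columns; infer_instance

-- ===== CLAIM (what is proved, stated in full; the proofs are below) =====
def Claim_equal_gen_columns : Prop := ∀ (num_colors_per_row : Int), Dom_gen_columns num_colors_per_row → Spec_gen_columns num_colors_per_row (gen_columns num_colors_per_row)

-- ===== LEMMAS AND PROOFS =====

-- A's loop body as a map over the flat index list
theorem genA_eq_map (n : Int) :
    gen_columns n = (PySem.List.pyRange 0 (n * 3) 1).map
      (fun i => PySem.List.pyGetD ["red", "blue", "green"] (PySem.Int.mod i 3) ""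
                  ++ PySem.Int.toStr (PySem.Int.floordiv i 3)) := by
  unfold gen_columns
  rw [PySem.List.foldl_append_singleton_eq_map]
  simp

-- B's nested loops as a flatMap over the row list
theorem genB_eq_flatMap (n : Int) :
    gen_columns_alt n = (PySem.List.pyRange 0 n 1).flatMap
      (fun row => ["red" ++ PySem.Int.toStr row, "blue" ++ PySem.Int.toStr row,
                   "green" ++ PySem.Int.toStr row]) := by
  unfold gen_columns_alt
  have h : ∀ (init : List String) (row : Int),
      (["red", "blue", "green"] : List String).foldl
        (fun cols channel => cols ++ [channel ++ PySem.Int.toStr row]) init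
      = init ++ ["red" ++ PySem.Int.toStr row, "blue" ++ PySem.Int.toStr row,
                 "green" ++ PySem.Int.toStr row] := by
    intro init row; simp [List.foldl]
  calc (PySem.List.pyRange 0 n 1).foldl
        (fun columns row =>
          (["red", "blue", "green"] : List String).foldl
            (fun cols channel => cols ++ [channel ++ PySem.Int.toStr row]) columns) []
      = (PySem.List.pyRange 0 n 1).foldl
        (fun columns row => columns ++
          ["red" ++ PySem.Int.toStr row, "blue" ++ PySem.Int.toStr row,
           "green" ++ PySem.Int.toStr row]) [] := by
        congr 1; funext acc x; exact h acc x
    _ = _ := by rw [PySem.List.foldl_append_eq_flatMap]; simp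

theorem genA_block (m : Int) :
    (PySem.List.pyRange (m * 3) (m * 3 + 3) 1).map
      (fun i => PySem.List.pyGetD ["red", "blue", "green"] (PySem.Int.mod i 3) ""
                  ++ PySem.Int.toStr (PySem.Int.floordiv i 3))
    = ["red" ++ PySem.Int.toStr m, "blue" ++ PySem.Int.toStr m,
       "green" ++ PySem.Int.toStr m] := by
  have h1 : PySem.List.pyRange (m * 3) (m * 3 + 3) 1
      = [m * 3, m * 3 + 1, m * 3 + 2] := by
    rw [PySem.List.pyRange_one_cons (by omega), PySem.List.pyRange_one_cons (by omega),
        PySem.List.pyRange_one_cons (by omega), PySem.List.pyRange_one_eq_nil (by omega)]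
    ring_nf
  rw [h1]
  have e0 : PySem.Int.mod (m * 3) 3 = 0 := by
    rw [PySem.Int.mod_eq_emod_of_pos (by norm_num)]; omega
  have e1 : PySem.Int.mod (m * 3 + 1) 3 = 1 := by
    rw [PySem.Int.mod_eq_emod_of_pos (by norm_num)]; omega
  have e2 : PySem.Int.mod (m * 3 + 2) 3 = 2 := by
    rw [PySem.Int.mod_eq_emod_of_pos (by norm_num)]; omega
  have d0 : PySem.Int.floordiv (m * 3) 3 = m := by
    rw [PySem.Int.floordiv_eq_ediv_of_pos (by norm_num)]; omega
  have d1 : PySem.Int.floordiv (m * 3 + 1) 3 = m := by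
    rw [PySem.Int.floordiv_eq_ediv_of_pos (by norm_num)]; omega
  have d2 : PySem.Int.floordiv (m * 3 + 2) 3 = m := by
    rw [PySem.Int.floordiv_eq_ediv_of_pos (by norm_num)]; omega
  simp only [List.map_cons, List.map_nil, e0, e1, e2, d0, d1, d2]
  simp [PySem.List.pyGetD]

theorem gen_eq (n : Int) : gen_columns n = gen_columns_alt n := by
  rw [genA_eq_map, genB_eq_flatMap]
  by_cases h : n ≤ 0
  · rw [PySem.List.pyRange_one_eq_nil (by omega), PySem.List.pyRange_one_eq_nil (by omega)]
    simp
  · obtain ⟨m, rfl⟩ := Int.eq_ofNat_of_zero_le (by omega : (0:Int) ≤ n)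
    induction m with
    | zero => simp [PySem.List.pyRange_one_eq_nil]
    | succ k ih =>
      by_cases hk : (0:Int) < k
      · have hsplitB : PySem.List.pyRange 0 ((k+1 : Nat) : Int) 1
            = PySem.List.pyRange 0 (k : Int) 1 ++ [(k : Int)] := by
          push_cast
          exact PySem.List.pyRange_one_succ_right (by omega)
        have hsplitA : PySem.List.pyRange 0 (((k+1 : Nat) : Int) * 3) 1
            = PySem.List.pyRange 0 ((k : Int) * 3) 1
              ++ PySem.List.pyRange ((k : Int) * 3) ((k : Int) * 3 + 3) 1 := by
          push_cast
          rw [← PySem.List.pyRange_one_append 0 ((k : Int) * 3) ((k : Int) * 3 + 3)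
                (by omega) (by omega)]
          ring_nf
        rw [hsplitA, hsplitB, List.map_append, List.flatMap_append, ih (by omega),
            genA_block (k : Int)]
        simp
      · have hk0 : (k : Nat) = 0 := by omega
        subst hk0
        have h1 : PySem.List.pyRange 0 ((0+1 : Nat) : Int) 1 = [(0:Int)] := by
          rw [PySem.List.pyRange_one_cons (by norm_num), PySem.List.pyRange_one_eq_nil (by norm_num)]
        have h3 : PySem.List.pyRange 0 (((0+1 : Nat) : Int) * 3) 1
            = PySem.List.pyRange (0 * 3) (0 * 3 + 3) 1 := by norm_num
        rw [h1, h3]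
        have := genA_block 0
        simpa using this

-- ===== VERDICT (by name: the statement is the Claim_ definition above) =====
theorem gen_columns_spec : Claim_equal_gen_columns := by
  intro n _
  unfold Spec_gen_columns
  exact gen_eq n
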